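-- pv_equiv track=rewrite | github.com/paiv/aoc2020 | code/17-2-conway-cubes/solve.py | solve
-- ===== SOURCE A (Python) =====
-- def solve(text, N=6):
--     grid = {(0, 0, y, x):1
--         for y,s in enumerate(text.strip().splitlines())
--         for x,v in enumerate(s)
--         if v == '#'}
--
--     def adjacent(k):
--         w, z, y, x = k
--         for dw in range(-1, 2):
--             for dz in range(-1, 2):
--                 for dy in range(-1, 2):
--                     for dx in range(-1, 2):
--                         if not (dx == 0 and dy == 0 and dz == 0 and dw == 0):
--                             yield (w + dw, z + dz, y + dy, x + dx)
--
--     assert len(list(adjacent((1,1,1,1)))) == 80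
--
--     def update(k, grid):
--         v = grid.get(k)
--         occupied = sum(grid.get(q, 0) for q in adjacent(k))
--         if occupied == 3:
--             return 1
--         elif (occupied == 2) and (v == 1):
--             return 1
--         return 0
--
--     for _ in range(N):
--         next = dict()
--         ks = {q for k,v in grid.items() if v for q in adjacent(k)}
--         for k in ks:
--             next[k] = update(k, grid)
--         grid = next
--
--     return sum(grid.values())
-- ===== SOURCE B (Python) =====
-- def solve(text, N=6):
--     active = {(0, 0, y, x)
--         for y, s in enumerate(text.strip().splitlines())
--         for x, v in enumerate(s)
--         if v == '#'}
--
--     offsets = [(dw, dz, dy, dx)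
--         for dw in (-1, 0, 1) for dz in (-1, 0, 1)
--         for dy in (-1, 0, 1) for dx in (-1, 0, 1)
--         if (dw, dz, dy, dx) != (0, 0, 0, 0)]
--
--     for _ in range(N):
--         counts = {}
--         for (w, z, y, x) in active:
--             for (dw, dz, dy, dx) in offsets:
--                 q = (w + dw, z + dz, y + dy, x + dx)
--                 counts[q] = counts.get(q, 0) + 1
--         active = {q for q, c in counts.items()
--                   if c == 3 or (c == 2 and q in active)}
--
--     return len(active)
-- ===== Notes on version B (the rewrite author's own statement) =====
-- stated objective: alternative
-- what changed: B keeps only the set of active cells and, per step, accumulates each active cell's 80 neighbor contributions into one counter dict and applies the same birth/survive rule to the counter, instead of A's per-candidate rescan of all 80 neighbors of every neighbor of every active cell (and A's carrying of dead 0-valued cells in its dict).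
import Mathlib
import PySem

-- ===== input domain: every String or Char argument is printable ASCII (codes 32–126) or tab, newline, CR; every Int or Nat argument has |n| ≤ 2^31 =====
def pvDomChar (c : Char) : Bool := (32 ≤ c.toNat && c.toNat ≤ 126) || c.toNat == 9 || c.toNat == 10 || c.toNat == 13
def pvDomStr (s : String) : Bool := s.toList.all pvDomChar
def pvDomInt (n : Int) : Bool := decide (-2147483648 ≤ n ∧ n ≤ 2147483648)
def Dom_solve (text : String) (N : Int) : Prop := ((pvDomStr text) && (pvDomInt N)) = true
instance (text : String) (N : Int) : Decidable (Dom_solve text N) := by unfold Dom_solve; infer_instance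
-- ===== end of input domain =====

-- B replaces A's per-candidate rescan of all 80 neighbours of every neighbour of every active
-- cell by one pass that pours each active cell's 80 neighbour contributions into a counter
-- dict and applies the same birth/survive rule to the counter (objective: alternative algorithm).

abbrev K4 : Type := Int × Int × Int × Int

-- ===== PORT A =====
-- range(-1, 2)
def pvDeltasA : List Int := PySem.List.pyRange (-1) 2 1

-- the generator 'adjacent(k)' (its yields, in order)
def adjacentA (k : K4) : List K4 :=
  pvDeltasA.flatMap fun dw =>
  pvDeltasA.flatMap fun dz =>
  pvDeltasA.flatMap fun dy =>
  pvDeltasA.filterMap fun dx =>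
    if dx = 0 ∧ dy = 0 ∧ dz = 0 ∧ dw = 0 then none
    else some (k.1 + dw, k.2.1 + dz, k.2.2.1 + dy, k.2.2.2 + dx)

-- the initial dict comprehension {(0,0,y,x): 1 for ... if v == '#'}
def initGridA (text : String) : PySem.Dict K4 Int :=
  ((PySem.List.enumerate (PySem.Str.splitlines (PySem.Str.strip text))).flatMap (fun ys =>
    (PySem.List.enumerate ys.2.toList).filterMap (fun xv =>
      if xv.2 = '#' then some ((((0:Int), (0:Int), ys.1, xv.1) : K4), (1:Int)) else none))).foldl
    (fun d p => d.insert p.1 p.2) PySem.Dict.empty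

-- update(k, grid)
def updateA (k : K4) (grid : PySem.Dict K4 Int) : Int :=
  let v := grid.get? k
  let occupied := ((adjacentA k).map (fun q => grid.getD q 0)).sum
  if occupied = 3 then 1
  else if occupied = 2 ∧ v = some 1 then 1
  else 0

-- one iteration of the 'for _ in range(N)' body
def stepA (grid : PySem.Dict K4 Int) : PySem.Dict K4 Int :=
  let ks : PySem.Set K4 :=
    PySem.Set.ofList ((grid.items.filter (fun kv => kv.2 != 0)).flatMap (fun kv => adjacentA kv.1))
  ks.foldl (fun nxt k => nxt.insert k (updateA k grid)) PySem.Dict.empty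

def solve (text : String) (N : Int) : Int :=
  let grid := (PySem.List.pyRange 0 N 1).foldl (fun g _ => stepA g) (initGridA text)
  grid.values.sum

-- ===== PORT B =====
-- the offsets list comprehension over (-1, 0, 1)^4
def offsetsB : List K4 :=
  ([-1, 0, 1] : List Int).flatMap fun dw =>
  ([-1, 0, 1] : List Int).flatMap fun dz =>
  ([-1, 0, 1] : List Int).flatMap fun dy =>
  ([-1, 0, 1] : List Int).filterMap fun dx =>
    if ((dw, dz, dy, dx) : K4) = ((0:Int), (0:Int), (0:Int), (0:Int)) then none
    else some (dw, dz, dy, dx)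

-- the initial set comprehension {(0,0,y,x) for ... if v == '#'}
def initActiveB (text : String) : PySem.Set K4 :=
  PySem.Set.ofList ((PySem.List.enumerate (PySem.Str.splitlines (PySem.Str.strip text))).flatMap (fun ys =>
    (PySem.List.enumerate ys.2.toList).filterMap (fun xv =>
      if xv.2 = '#' then some (((0:Int), (0:Int), ys.1, xv.1) : K4) else none)))

-- one iteration of B's loop body: pour contributions into 'counts', then apply the rule
def stepB (act : PySem.Set K4) : PySem.Set K4 :=
  let counts : PySem.Dict K4 Int :=
    act.foldl (fun c k =>
      offsetsB.foldl (fun c d =>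
        c.insert (k.1 + d.1, k.2.1 + d.2.1, k.2.2.1 + d.2.2.1, k.2.2.2 + d.2.2.2)
          (c.getD (k.1 + d.1, k.2.1 + d.2.1, k.2.2.1 + d.2.2.1, k.2.2.2 + d.2.2.2) 0 + 1)) c)
      PySem.Dict.empty
  PySem.Set.ofList (counts.items.filterMap (fun qc =>
    if qc.2 = 3 ∨ (qc.2 = 2 ∧ PySem.Set.contains act qc.1) then some qc.1 else none))

def solve_alt (text : String) (N : Int) : Int :=
  let act := (PySem.List.pyRange 0 N 1).foldl (fun a _ => stepB a) (initActiveB text)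
  (PySem.Set.len act : Int)

-- ===== PRECONDITION & SPEC =====
def Spec_solve (text : String) (N : Int) (out : Int) : Prop := out = solve_alt text N
instance (text : String) (N : Int) (out : Int) : Decidable (Spec_solve text N out) := by unfold Spec_solve; infer_instance

-- ===== CLAIM (what is proved, stated in full; the proofs are below) =====
def Claim_equal_solve : Prop := ∀ (text : String) (N : Int), Dom_solve text N → Spec_solve text N (solve text N)

-- ===== LEMMAS AND PROOFS =====

def Nbr (k q : K4) : Prop :=
  (-1 ≤ q.1 - k.1 ∧ q.1 - k.1 ≤ 1) ∧ (-1 ≤ q.2.1 - k.2.1 ∧ q.2.1 - k.2.1 ≤ 1) ∧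
  (-1 ≤ q.2.2.1 - k.2.2.1 ∧ q.2.2.1 - k.2.2.1 ≤ 1) ∧ (-1 ≤ q.2.2.2 - k.2.2.2 ∧ q.2.2.2 - k.2.2.2 ≤ 1) ∧
  q ≠ k

def nbrb (k q : K4) : Bool := @decide (Nbr k q) (by unfold Nbr; infer_instance)

theorem pvDeltasA_eq : pvDeltasA = [-1, 0, 1] := by decide

theorem nbrb_iff (k q : K4) : nbrb k q = true ↔ Nbr k q := by
  unfold nbrb; exact @decide_eq_true_iff (Nbr k q) (by unfold Nbr; infer_instance)

theorem mem_adjacentA (k q : K4) : q ∈ adjacentA k ↔ Nbr k q := by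
  obtain ⟨a, b, c, e⟩ := k
  obtain ⟨a', b', c', e'⟩ := q
  simp only [adjacentA, pvDeltasA_eq, List.mem_flatMap, List.mem_filterMap, List.mem_cons,
    List.not_mem_nil, or_false, Nbr, Prod.ext_iff, Option.ite_none_left_eq_some,
    Option.some.injEq, ne_eq]
  constructor
  · rintro ⟨dw, hw, dz, hz, dy, hy, dx, hx, hne, h1, h2, h3, h4⟩
    subst h1; subst h2; subst h3; subst h4
    refine ⟨by rcases hw with h|h|h <;> omega, by rcases hz with h|h|h <;> omega,
      by rcases hy with h|h|h <;> omega, by rcases hx with h|h|h <;> omega, ?_⟩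
    intro ⟨u1,u2,u3,u4⟩
    exact hne ⟨by omega, by omega, by omega, by omega⟩
  · rintro ⟨h1, h2, h3, h4, hne⟩
    refine ⟨a' - a, by omega, b' - b, by omega, c' - c, by omega, e' - e, by omega, ?_, by omega, by omega, by omega, by omega⟩
    intro ⟨u1,u2,u3,u4⟩
    exact hne ⟨by omega, by omega, by omega, by omega⟩

def shift (k d : K4) : K4 := (k.1 + d.1, k.2.1 + d.2.1, k.2.2.1 + d.2.2.1, k.2.2.2 + d.2.2.2)

theorem adjacentA_eq_map (k : K4) : adjacentA k = offsetsB.map (shift k) := by rfl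

theorem nbr_symm (k q : K4) : Nbr k q ↔ Nbr q k := by
  obtain ⟨a, b, c, e⟩ := k; obtain ⟨a', b', c', e'⟩ := q
  simp only [Nbr, ne_eq, Prod.mk.injEq]
  omega

theorem shift_inj (k : K4) : Function.Injective (shift k) := by
  rintro ⟨a,b,c,e⟩ ⟨a',b',c',e'⟩ h
  simp only [shift, Prod.mk.injEq] at h ⊢
  omega

theorem offsetsB_nodup : offsetsB.Nodup := by decide

theorem nodup_map_offsetsB_shift (k : K4) : (offsetsB.map (shift k)).Nodup :=
  offsetsB_nodup.map (shift_inj k)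

theorem adjacentA_nodup (k : K4) : (adjacentA k).Nodup := by
  rw [adjacentA_eq_map]; exact nodup_map_offsetsB_shift k

theorem mem_map_offsetsB_shift (k q : K4) : q ∈ offsetsB.map (shift k) ↔ Nbr k q := by
  rw [← adjacentA_eq_map]; exact mem_adjacentA k q

theorem countP_eq_of_mem_iff {l₁ l₂ : List K4} (h₁ : l₁.Nodup) (h₂ : l₂.Nodup)
    (p q : K4 → Bool) (h : ∀ x, (x ∈ l₁ ∧ p x = true) ↔ (x ∈ l₂ ∧ q x = true)) :
    l₁.countP p = l₂.countP q := by
  rw [List.countP_eq_length_filter, List.countP_eq_length_filter]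
  exact ((List.perm_ext_iff_of_nodup (h₁.filter p) (h₂.filter q)).2 (by
    intro a; simp only [List.mem_filter]; exact h a)).length_eq

def cells (text : String) : List K4 :=
  (PySem.List.enumerate (PySem.Str.splitlines (PySem.Str.strip text))).flatMap (fun ys =>
    (PySem.List.enumerate ys.2.toList).filterMap (fun xv =>
      if xv.2 = '#' then some (((0:Int), (0:Int), ys.1, xv.1) : K4) else none))

theorem get?_foldl_insert_const (l : List K4) (d : PySem.Dict K4 Int) (q : K4) :
    (l.foldl (fun d k => d.insert k 1) d).get? q = if q ∈ l then some 1 else d.get? q := by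
  induction l generalizing d with
  | nil => simp
  | cons x xs ih =>
    simp only [List.foldl_cons, ih, List.mem_cons]
    by_cases hx : q ∈ xs
    · simp [hx]
    · by_cases hq : q = x
      · subst hq; simp [hx, PySem.Dict.get?_insert_self]
      · simp only [hx, hq, if_false, or_self]
        exact PySem.Dict.get?_insert_of_ne d 1 hq

theorem initGridA_eq (text : String) :
    initGridA text = (cells text).foldl (fun d k => d.insert k 1) PySem.Dict.empty := by
  have hp : ((PySem.List.enumerate (PySem.Str.splitlines (PySem.Str.strip text))).flatMap (fun ys =>
      (PySem.List.enumerate ys.2.toList).filterMap (fun xv =>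
        if xv.2 = '#' then some ((((0:Int), (0:Int), ys.1, xv.1) : K4), (1:Int)) else none)))
      = (cells text).map (fun k => (k, (1:Int))) := by
    simp [cells, List.map_flatMap, List.map_filterMap, apply_ite]
  rw [initGridA, hp, List.foldl_map]

theorem initGridA_get? (text : String) (q : K4) :
    (initGridA text).get? q = if q ∈ cells text then some 1 else none := by
  rw [initGridA_eq, get?_foldl_insert_const]
  simp [PySem.Dict.get?_empty]

theorem initGridA_keys_nodup (text : String) : (initGridA text).keys.Nodup := by
  rw [initGridA_eq]
  exact PySem.Dict.nodup_keys_foldl_insert _ _ _ (by simp [PySem.Dict.keys_empty])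

theorem initActiveB_eq (text : String) : initActiveB text = PySem.Set.ofList (cells text) := rfl

def InvAB (g : PySem.Dict K4 Int) (act : PySem.Set K4) : Prop :=
  g.keys.Nodup ∧ act.Nodup ∧
  (∀ q, g.get? q = some 1 ↔ q ∈ act) ∧
  (∀ q v, g.get? q = some v → v = 0 ∨ v = 1)

theorem inv_init (text : String) : InvAB (initGridA text) (initActiveB text) := by
  refine ⟨initGridA_keys_nodup text, by rw [initActiveB_eq]; exact PySem.Set.nodup_ofList _, ?_, ?_⟩
  · intro q
    rw [initGridA_get?, initActiveB_eq]
    by_cases h : q ∈ cells text <;> simp [h, PySem.Set.mem_ofList]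
  · intro q v h
    rw [initGridA_get?] at h
    by_cases hq : q ∈ cells text <;> simp [hq] at h
    omega

theorem inv_sum (g : PySem.Dict K4 Int) (act : PySem.Set K4) (h : InvAB g act) :
    g.values.sum = (PySem.Set.len act : Int) := by
  obtain ⟨hk, ha, h1, h01⟩ := h
  rw [PySem.Dict.values_eq_map_keys g hk 0]
  have hmap : g.keys.map (fun k => g.getD k 0)
      = g.keys.map (fun k => if decide (k ∈ (act : List K4)) = true then 1 else 0) := by
    apply List.map_congr_left
    intro k hkmem
    have : g.get? k ≠ none := by
      rw [ne_eq, PySem.Dict.get?_eq_none_iff_not_mem_keys]; simp [hkmem]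
    obtain ⟨v, hv⟩ := Option.ne_none_iff_exists'.1 this
    rcases h01 k v hv with h0 | h1'
    · subst h0
      have hact : k ∉ (act : List K4) := by
        intro hc; have := (h1 k).2 hc; rw [hv] at this; simp at this
      simp [PySem.Dict.getD_of_get?_eq_some _ _ hv, hact]
    · subst h1'
      have hact : k ∈ (act : List K4) := (h1 k).1 hv
      simp [PySem.Dict.getD_of_get?_eq_some _ _ hv, hact]
  rw [hmap, PySem.List.sum_map_ite_one_zero]
  have : g.keys.countP (fun k => decide (k ∈ (act : List K4)))
      = (act : List K4).countP (fun _ => true) := by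
    apply countP_eq_of_mem_iff hk ha
    intro x
    constructor
    · rintro ⟨_, hx⟩; simp at hx; exact ⟨hx, rfl⟩
    · rintro ⟨hx, _⟩
      refine ⟨?_, by simpa using hx⟩
      have := (h1 x).2 hx
      by_contra hmem
      have := (PySem.Dict.get?_eq_none_iff_not_mem_keys g x).2 (by simpa using hmem)
      rw [(h1 x).2 hx] at this
      simp at this
  rw [this, List.countP_true]
  rfl

def contrib (act : PySem.Set K4) : List K4 :=
  (act : List K4).flatMap (fun k => offsetsB.map (shift k))

theorem stepB_counts_eq (act : PySem.Set K4) :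
    (act : List K4).foldl (fun c k =>
      offsetsB.foldl (fun c d =>
        c.insert (k.1 + d.1, k.2.1 + d.2.1, k.2.2.1 + d.2.2.1, k.2.2.2 + d.2.2.2)
          (c.getD (k.1 + d.1, k.2.1 + d.2.1, k.2.2.1 + d.2.2.1, k.2.2.2 + d.2.2.2) 0 + 1)) c)
      PySem.Dict.empty
    = PySem.Dict.counter (contrib act) := by
  rw [← PySem.Dict.foldl_insert_getD_add_one_eq_counter, contrib, List.foldl_flatMap]
  simp only [List.foldl_map]
  rfl

theorem count_contrib (act : PySem.Set K4) (q : K4) :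
    List.count q (contrib act) = (act : List K4).countP (fun k => nbrb k q) := by
  rw [contrib, List.count_flatMap]
  induction (act : List K4) with
  | nil => simp
  | cons x xs ih =>
    simp only [List.map_cons, List.sum_cons, List.countP_cons, ih, Function.comp_apply]
    by_cases h : Nbr x q
    · rw [List.count_eq_one_of_mem (nodup_map_offsetsB_shift x) ((mem_map_offsetsB_shift x q).2 h)]
      simp [nbrb_iff, h]; omega
    · rw [List.count_eq_zero_of_not_mem (fun hc => h ((mem_map_offsetsB_shift x q).1 hc))]
      simp [nbrb_iff, h]

theorem getD_act (g : PySem.Dict K4 Int) (act : PySem.Set K4) (h : InvAB g act) (q : K4) :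
    g.getD q 0 = if q ∈ (act : List K4) then 1 else 0 := by
  obtain ⟨hk, ha, h1, h01⟩ := h
  cases hv : g.get? q with
  | none =>
    rw [PySem.Dict.getD_of_get?_eq_none _ _ hv]
    have : q ∉ (act : List K4) := fun hc => by rw [(h1 q).2 hc] at hv; cases hv
    simp [this]
  | some v =>
    rw [PySem.Dict.getD_of_get?_eq_some _ _ hv]
    rcases h01 q v hv with h0 | h1'
    · subst h0
      have : q ∉ (act : List K4) := fun hc => by
        rw [(h1 q).2 hc] at hv; cases hv
      simp [this]
    · subst h1'
      simp [(h1 q).1 hv]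

theorem occupied_eq (g : PySem.Dict K4 Int) (act : PySem.Set K4) (h : InvAB g act) (k : K4) :
    ((adjacentA k).map (fun q => g.getD q 0)).sum = (List.count k (contrib act) : Int) := by
  have hmap : (adjacentA k).map (fun q => g.getD q 0)
      = (adjacentA k).map (fun q => if decide (q ∈ (act : List K4)) = true then 1 else 0) := by
    apply List.map_congr_left
    intro q _
    rw [getD_act g act h q]
    by_cases hq : q ∈ (act : List K4) <;> simp [hq]
  rw [hmap, PySem.List.sum_map_ite_one_zero, count_contrib]
  congr 1
  apply countP_eq_of_mem_iff (adjacentA_nodup k) h.2.1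
  intro x
  simp only [decide_eq_true_eq, nbrb_iff, mem_adjacentA]
  constructor
  · rintro ⟨hn, hx⟩; exact ⟨hx, (nbr_symm x k).2 hn⟩
  · rintro ⟨hx, hn⟩; exact ⟨(nbr_symm x k).1 hn, hx⟩

def ksList (g : PySem.Dict K4 Int) : List K4 :=
  (g.items.filter (fun kv => kv.2 != 0)).flatMap (fun kv => adjacentA kv.1)

theorem mem_ksList (g : PySem.Dict K4 Int) (act : PySem.Set K4) (h : InvAB g act) (q : K4) :
    q ∈ ksList g ↔ q ∈ contrib act := by
  obtain ⟨hk, ha, h1, h01⟩ := h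
  have hcon : q ∈ contrib act ↔ ∃ k ∈ (act : List K4), Nbr k q := by
    simp only [contrib, List.mem_flatMap, mem_map_offsetsB_shift]
  rw [hcon]
  simp only [ksList, List.mem_flatMap, List.mem_filter, mem_adjacentA, bne_iff_ne, ne_eq]
  constructor
  · rintro ⟨⟨k, v⟩, ⟨hm, hv⟩, hn⟩
    have hg := PySem.Dict.get?_of_mem_items g hm hk
    rcases h01 k v hg with h0 | h1'
    · exact absurd h0 hv
    · subst h1'
      exact ⟨k, (h1 k).1 hg, hn⟩
  · rintro ⟨k, hkact, hn⟩
    exact ⟨(k, 1), ⟨PySem.Dict.mem_items_of_get?_eq_some g ((h1 k).2 hkact), by simp⟩, hn⟩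

theorem stepA_items (g : PySem.Dict K4 Int) :
    (stepA g).items = (PySem.Set.ofList (ksList g)).map (fun k => (k, updateA k g)) := by
  show ((PySem.Set.ofList (ksList g)).foldl (fun nxt k => nxt.insert k (updateA k g)) PySem.Dict.empty).items = _
  have := PySem.Dict.items_foldl_insert_fresh (PySem.Set.ofList (ksList g)) (fun a => a)
    (fun a => updateA a g) PySem.Dict.empty (fun a _ => PySem.Dict.contains_empty a)
    (by simp [PySem.Set.nodup_ofList])
  simpa using this

theorem stepA_keys (g : PySem.Dict K4 Int) : (stepA g).keys = PySem.Set.ofList (ksList g) := by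
  show (stepA g).items.map (·.1) = _
  rw [stepA_items, List.map_map]
  rw [show ((·.1) ∘ fun k => (k, updateA k g) : K4 → K4) = id from rfl, List.map_id]

theorem stepA_get? (g : PySem.Dict K4 Int) (q : K4) :
    (stepA g).get? q = if q ∈ ksList g then some (updateA q g) else none := by
  by_cases hq : q ∈ ksList g
  · rw [if_pos hq]
    refine PySem.Dict.get?_of_mem_items (stepA g) ?_ ?_
    · rw [stepA_items]
      exact List.mem_map.2 ⟨q, (PySem.Set.mem_ofList _ _).2 hq, rfl⟩
    · rw [stepA_keys]; exact PySem.Set.nodup_ofList _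
  · rw [if_neg hq]
    rw [PySem.Dict.get?_eq_none_iff_not_mem_keys, stepA_keys]
    intro hc; exact hq ((PySem.Set.mem_ofList _ _).1 hc)

theorem updateA_rule (g : PySem.Dict K4 Int) (act : PySem.Set K4) (h : InvAB g act) (k : K4) :
    updateA k g = if ((List.count k (contrib act) : Int) = 3 ∨
      ((List.count k (contrib act) : Int) = 2 ∧ k ∈ (act : List K4))) then 1 else 0 := by
  have hocc := occupied_eq g act h k
  have hv : g.get? k = some 1 ↔ k ∈ (act : List K4) := h.2.2.1 k
  rw [updateA]
  simp only [hocc]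
  by_cases h3 : (List.count k (contrib act) : Int) = 3
  · simp [h3]
  · by_cases h2 : (List.count k (contrib act) : Int) = 2
    · by_cases hm : k ∈ (act : List K4)
      · simp [h2, hv.2 hm, hm]
      · have : ¬ g.get? k = some 1 := fun hc => hm (hv.1 hc)
        simp [h2, this, hm]
    · simp [h3, h2]

theorem mem_stepB (act : PySem.Set K4) (q : K4) :
    q ∈ stepB act ↔ q ∈ contrib act ∧ ((List.count q (contrib act) : Int) = 3 ∨
      ((List.count q (contrib act) : Int) = 2 ∧ q ∈ (act : List K4))) := by
  show q ∈ PySem.Set.ofList (((act : List K4).foldl _ PySem.Dict.empty).items.filterMap _) ↔ _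
  rw [PySem.Set.mem_ofList]
  rw [show ((act : List K4).foldl (fun c k =>
      offsetsB.foldl (fun c d =>
        c.insert (k.1 + d.1, k.2.1 + d.2.1, k.2.2.1 + d.2.2.1, k.2.2.2 + d.2.2.2)
          (c.getD (k.1 + d.1, k.2.1 + d.2.1, k.2.2.1 + d.2.2.1, k.2.2.2 + d.2.2.2) 0 + 1)) c)
      PySem.Dict.empty) = PySem.Dict.counter (contrib act) from stepB_counts_eq act]
  rw [PySem.Dict.items_counter]
  simp only [List.mem_filterMap, List.mem_map, PySem.Set.mem_ofList]
  constructor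
  · rintro ⟨kc, ⟨k, hk', rfl⟩, hif⟩
    by_cases hc : (List.count k (contrib act) : Int) = 3 ∨
        ((List.count k (contrib act) : Int) = 2 ∧ PySem.Set.contains act k = true)
    · simp only [if_pos hc] at hif
      obtain rfl : k = q := by simpa using hif
      refine ⟨hk', ?_⟩
      rcases hc with h3 | ⟨h2, hm⟩
      · exact Or.inl h3
      · exact Or.inr ⟨h2, (PySem.Set.contains_iff act k).1 hm⟩
    · rw [if_neg hc] at hif; cases hif
  · rintro ⟨hq, hrule⟩
    refine ⟨(q, (List.count q (contrib act) : Int)), ⟨q, hq, rfl⟩, ?_⟩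
    have hcond : ((q, (List.count q (contrib act) : Int)) : K4 × Int).2 = 3 ∨
        (((q, (List.count q (contrib act) : Int)) : K4 × Int).2 = 2 ∧
          PySem.Set.contains act ((q, (List.count q (contrib act) : Int)) : K4 × Int).1 = true) := by
      rcases hrule with h3 | ⟨h2, hm⟩
      · exact Or.inl h3
      · exact Or.inr ⟨h2, (PySem.Set.contains_iff act q).2 hm⟩
    rw [if_pos hcond]

theorem inv_step (g : PySem.Dict K4 Int) (act : PySem.Set K4) (h : InvAB g act) :
    InvAB (stepA g) (stepB act) := by
  refine ⟨?_, ?_, ?_, ?_⟩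
  · rw [stepA_keys]; exact PySem.Set.nodup_ofList _
  · exact PySem.Set.nodup_ofList _
  · intro q
    rw [stepA_get?, mem_stepB]
    by_cases hq : q ∈ ksList g
    · rw [if_pos hq, updateA_rule g act h q]
      have hc : q ∈ contrib act := (mem_ksList g act h q).1 hq
      by_cases hr : (List.count q (contrib act) : Int) = 3 ∨
          ((List.count q (contrib act) : Int) = 2 ∧ q ∈ (act : List K4))
      · simp [hr, hc]
      · simp only [if_neg hr]
        constructor
        · intro hcon; cases hcon  -- some 0 = some 1 impossible... handle below
        · rintro ⟨_, hr'⟩; exact absurd hr' hr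
    · rw [if_neg hq]
      have hc : q ∉ contrib act := fun hcc => hq ((mem_ksList g act h q).2 hcc)
      simp [hc]
  · intro q v hv
    rw [stepA_get?] at hv
    by_cases hq : q ∈ ksList g
    · rw [if_pos hq] at hv
      obtain rfl : updateA q g = v := by simpa using hv
      rw [updateA_rule g act h q]
      split_ifs <;> simp
    · rw [if_neg hq] at hv; cases hv

-- ===== VERDICT (by name: the statement is the Claim_ definition above) =====
theorem solve_spec : Claim_equal_solve := by
  intro text N _
  unfold Spec_solve solve solve_alt
  have main : ∀ (l : List Int) (g : PySem.Dict K4 Int) (act : PySem.Set K4), InvAB g act →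
      InvAB (l.foldl (fun g _ => stepA g) g) (l.foldl (fun a _ => stepB a) act) := by
    intro l
    induction l with
    | nil => intro g act h; exact h
    | cons x xs ih => intro g act h; exact ih _ _ (inv_step g act h)
  exact inv_sum _ _ (main _ _ _ (inv_init text))
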